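-- pv_equiv track=rewrite | github.com/Joshua12012/Optimal-Routing-Algorithms | GA/ga.py | resolve_duplicates
-- ===== SOURCE A (Python) =====
-- def resolve_duplicates(child, parent1, parent2):
--     # Remove duplicates and replace with missing elements
--     unique_genes = set(child)
--     missing_genes = [gene for gene in parent1 if gene not in unique_genes]
--     idx = 0
--     for i in range(len(child)):
--         if child.count(child[i]) > 1:
--             child[i] = missing_genes[idx]
--             idx += 1
--     return child
-- ===== SOURCE B (Python) =====
-- def resolve_duplicates(child, parent1, parent2):
--     # Right-to-left pass with a seen-set marks each position as the last
--     # occurrence of its gene or not; a second pass rebuilds the list, replacing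
--     # every non-last occurrence with the next missing parent1 gene in order.
--     # Returns a fresh list (A mutates child in place; return values agree).
--     seen = set()
--     kept = []
--     for g in reversed(child):
--         kept.append(g not in seen)
--         seen.add(g)
--     missing = (g for g in parent1 if g not in seen)
--     return [g if k else next(missing) for g, k in zip(child, reversed(kept))]
-- ===== Notes on version B (the rewrite author's own statement) =====
-- stated objective: faster
-- what changed: A rescans the mutating child with child.count at every index and patches it in place; B never counts: a right-to-left pass with a seen-set marks each position as last occurrence of its gene, then one zip pass rebuilds the list, drawing replacements for the non-last positions from a generator of missing parent1 genes.
import Mathlib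
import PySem

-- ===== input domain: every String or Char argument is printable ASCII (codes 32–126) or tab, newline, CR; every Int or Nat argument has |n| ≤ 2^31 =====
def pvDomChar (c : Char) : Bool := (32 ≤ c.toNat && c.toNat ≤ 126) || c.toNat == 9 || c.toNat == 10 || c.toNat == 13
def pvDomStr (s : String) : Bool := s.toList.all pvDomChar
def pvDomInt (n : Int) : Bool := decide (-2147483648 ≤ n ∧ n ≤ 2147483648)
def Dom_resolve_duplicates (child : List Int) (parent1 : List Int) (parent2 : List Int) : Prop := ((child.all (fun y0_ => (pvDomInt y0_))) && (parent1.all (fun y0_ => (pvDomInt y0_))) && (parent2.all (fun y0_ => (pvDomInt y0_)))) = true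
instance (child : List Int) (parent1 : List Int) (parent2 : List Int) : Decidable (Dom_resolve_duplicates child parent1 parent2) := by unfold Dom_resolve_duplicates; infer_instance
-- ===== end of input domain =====

-- B replaces A's quadratic child.count rescans by a right-to-left seen-set pass marking
-- last occurrences plus one rebuild pass (faster, asymptotic). A mutates `child` in place,
-- B returns a fresh list; the equivalence proved here is about the RETURN value only.

-- ===== PORT A =====
-- loop body of A's `for i in range(len(child))`, state = (child, idx)
def rdStepA (missing_genes : List Int) (s : List Int × Int) (i : Int) : List Int × Int :=
  let c := s.1
  let idx := s.2
  -- `child.count(child[i]) > 1`; i is produced by range(len(child)), so in range: pyGetD is exact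
  if 1 < PySem.List.count c (PySem.List.pyGetD c i 0) then
    -- `child[i] = missing_genes[idx]`: idx < len(missing_genes) under Pre_ (else Python raises IndexError)
    (PySem.List.pySetD c i (PySem.List.pyGetD missing_genes idx 0), idx + 1)
  else s

def resolve_duplicates (child : List Int) (parent1 : List Int) (parent2 : List Int) : List Int :=
  let unique_genes : PySem.Set Int := PySem.Set.ofList child
  let missing_genes : List Int := parent1.filter (fun gene => !(PySem.Set.contains unique_genes gene))
  ((PySem.List.pyRange 0 (child.length : Int) 1).foldl (rdStepA missing_genes) (child, 0)).1

-- ===== PORT B =====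
-- body of B's `for g in reversed(child)`: state = (seen, kept), kept appended to
def rdRevStep (s : PySem.Set Int × List Bool) (g : Int) : PySem.Set Int × List Bool :=
  (PySem.Set.add s.1 g, s.2 ++ [!(PySem.Set.contains s.1 g)])

-- body of B's final comprehension over zip(child, reversed(kept)); the generator
-- `missing` is consumed in order, modelled by an index into its underlying list
def rdBuildStep (missing : List Int) (s : List Int × Int) (gk : Int × Bool) : List Int × Int :=
  if gk.2 then (s.1 ++ [gk.1], s.2)
  else (s.1 ++ [PySem.List.pyGetD missing s.2 0], s.2 + 1)

def resolve_duplicates_alt (child : List Int) (parent1 : List Int) (parent2 : List Int) : List Int :=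
  let p := child.reverse.foldl rdRevStep ((PySem.Set.ofList [] : PySem.Set Int), ([] : List Bool))
  let seen := p.1
  let kept := p.2.reverse
  let missing := parent1.filter (fun g => !(PySem.Set.contains seen g))
  ((child.zip kept).foldl (rdBuildStep missing) (([] : List Int), (0 : Int))).1

-- ===== PRECONDITION & SPEC =====
-- number of positions of l that still have a later occurrence of the same value
def rdDupCount : List Int → Nat
  | [] => 0
  | v :: r => (if v ∈ r then 1 else 0) + rdDupCount r

-- Pre_ excludes exactly the inputs on which A raises IndexError: A needs one missing
-- parent1 gene per replaced duplicate position (B's next(missing) raises there too).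
def Pre_resolve_duplicates (child : List Int) (parent1 : List Int) (parent2 : List Int) : Prop :=
  rdDupCount child ≤ (parent1.filter (fun g => decide (g ∉ child))).length

instance (child : List Int) (parent1 : List Int) (parent2 : List Int) : Decidable (Pre_resolve_duplicates child parent1 parent2) := by unfold Pre_resolve_duplicates; infer_instance

def pvWitness_resolve_duplicates : List Int × List Int × List Int := ([1, 1, 2], [3, 4, 2], [])

def Spec_resolve_duplicates (child : List Int) (parent1 : List Int) (parent2 : List Int) (out : List Int) : Prop := out = resolve_duplicates_alt child parent1 parent2
instance (child : List Int) (parent1 : List Int) (parent2 : List Int) (out : List Int) : Decidable (Spec_resolve_duplicates child parent1 parent2 out) := by unfold Spec_resolve_duplicates; infer_instance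

-- ===== CLAIM (what is proved, stated in full; the proofs are below) =====
def Claim_equal_resolve_duplicates : Prop := ∀ (child : List Int) (parent1 : List Int) (parent2 : List Int), Dom_resolve_duplicates child parent1 parent2 → Pre_resolve_duplicates child parent1 parent2 → Spec_resolve_duplicates child parent1 parent2 (resolve_duplicates child parent1 parent2)

-- ===== LEMMAS AND PROOFS =====

-- closed form of the kept flags produced by B's reverse pass, parametrised by the
-- membership predicate of the initial seen-set
def markKeepP (p : Int → Bool) : List Int → List Bool
  | [] => []
  | v :: r => (!(p v || decide (v ∈ r))) :: markKeepP p r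

lemma rd_rev_pass (l : List Int) (p : Int → Bool) :
    ∀ (s0 : PySem.Set Int) (k0 : List Bool),
      (∀ g, g ∈ s0 ↔ p g = true) →
      (l.foldr (fun g s => rdRevStep s g) (s0, k0)).2 = k0 ++ (markKeepP p l).reverse ∧
      (∀ g, g ∈ (l.foldr (fun g s => rdRevStep s g) (s0, k0)).1 ↔ (p g = true ∨ g ∈ l)) := by
  induction l with
  | nil =>
    intro s0 k0 h0
    refine ⟨by simp [markKeepP], ?_⟩
    intro g
    simp [h0 g]
  | cons v r ih =>
    intro s0 k0 h0
    obtain ⟨h2, h1⟩ := ih s0 k0 h0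
    simp only [List.foldr_cons, rdRevStep] at h1 h2 ⊢
    have hflag : PySem.Set.contains
        (r.foldr (fun g s => (PySem.Set.add s.1 g, s.2 ++ [!(PySem.Set.contains s.1 g)])) (s0, k0)).1 v
        = (p v || decide (v ∈ r)) := by
      rw [Bool.eq_iff_iff, PySem.Set.contains_iff, h1 v]
      simp
    constructor
    · rw [h2, hflag]
      simp [markKeepP, List.append_assoc]
    · intro g
      rw [PySem.Set.mem_add, h1 g]
      simp [List.mem_cons]
      tauto


lemma rd_set_append_len : ∀ (a : List Int) (v : Int) (r : List Int) (m : Int),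
    (a ++ v :: r).set a.length m = a ++ m :: r := by
  intro a
  induction a with
  | nil => intro v r m; simp
  | cons x a ih => intro v r m; simp [List.set, ih]

lemma rd_getD_append_len : ∀ (a : List Int) (v : Int) (r : List Int),
    (a ++ v :: r).getD a.length 0 = v := by
  intro a
  induction a with
  | nil => intro v r; simp
  | cons x a ih => intro v r; simpa using ih v r

lemma rd_loop_eq (orig missing : List Int) (hm : ∀ x ∈ missing, x ∉ orig) :
    ∀ (j k : Nat) (acc : List Int) (idx : Nat),
      j + k = orig.length →
      acc.length = k →
      (∀ v ∈ orig.drop k, v ∉ acc) →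
      idx + rdDupCount (orig.drop k) ≤ missing.length →
      ((PySem.List.pyRange (k : Int) (orig.length : Int) 1).foldl (rdStepA missing)
          (acc ++ orig.drop k, (idx : Int))).1
        = (((orig.drop k).zip (markKeepP (fun _ => false) (orig.drop k))).foldl
            (rdBuildStep missing) (acc, (idx : Int))).1 := by
  intro j
  induction j with
  | zero =>
    intro k acc idx hjk hlen hpre hidx
    have hnil : orig.drop k = [] := List.drop_eq_nil_of_le (by omega)
    rw [PySem.List.pyRange_one_eq_nil (by exact_mod_cast (by omega : orig.length ≤ k)), hnil]
    simp
  | succ j ih =>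
    intro k acc idx hjk hlen hpre hidx
    have hk : k < orig.length := by omega
    have hdropk : orig.drop k = orig[k] :: orig.drop (k+1) := List.drop_eq_getElem_cons hk
    have hvmem : orig[k] ∈ orig.drop k := by rw [hdropk]; exact List.mem_cons_self
    have hacc0 : acc.count orig[k] = 0 := List.count_eq_zero.mpr (hpre orig[k] hvmem)
    have hget : PySem.List.pyGetD (acc ++ orig.drop k) (k : Int) 0 = orig[k] := by
      rw [PySem.List.pyGetD_natCast, hdropk]
      have h := rd_getD_append_len acc orig[k] (orig.drop (k+1))
      rwa [hlen] at h
    have hcount : PySem.List.count (acc ++ orig.drop k) orig[k]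
        = (orig.drop (k+1)).count orig[k] + 1 := by
      rw [PySem.List.count_eq, hdropk, List.count_append, List.count_cons_self, hacc0]
      omega
    rw [PySem.List.pyRange_one_cons (by exact_mod_cast hk)]
    conv_rhs => rw [hdropk]
    simp only [markKeepP, List.zip_cons_cons, List.foldl_cons, rdStepA, rdBuildStep, hget, hcount]
    have hsub : ∀ w ∈ orig.drop (k+1), w ∈ orig.drop k := by
      intro w hw; rw [hdropk]; exact List.mem_cons_of_mem _ hw
    by_cases hdup : orig[k] ∈ orig.drop (k+1)
    · -- duplicate: both replace with missing[idx]
      have hdupk : rdDupCount (orig.drop k) = rdDupCount (orig.drop (k+1)) + 1 := by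
        rw [hdropk]; simp [rdDupCount, hdup]; omega
      have hcpos : 0 < (orig.drop (k+1)).count orig[k] := List.count_pos_iff.mpr hdup
      have hidxlt : idx < missing.length := by omega
      have hmmem : PySem.List.pyGetD missing (idx : Int) 0 ∈ missing := by
        rw [PySem.List.pyGetD_natCast, List.getD_eq_getElem missing 0 hidxlt]
        exact List.getElem_mem hidxlt
      rw [if_pos (by push_cast; omega), if_neg (by simp [hdup])]
      have hset : PySem.List.pySetD (acc ++ orig.drop k) (k : Int)
            (PySem.List.pyGetD missing (idx : Int) 0)
          = (acc ++ [PySem.List.pyGetD missing (idx : Int) 0]) ++ orig.drop (k+1) := by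
        rw [PySem.List.pySetD_natCast, hdropk]
        have h := rd_set_append_len acc orig[k] (orig.drop (k+1)) (PySem.List.pyGetD missing (idx : Int) 0)
        rw [hlen] at h
        rw [h]
        simp
      rw [hset]
      have hcast1 : ((k : Int) + 1) = ((k + 1 : Nat) : Int) := by push_cast; ring
      have hcast2 : ((idx : Int) + 1) = ((idx + 1 : Nat) : Int) := by push_cast; ring
      rw [hcast1, hcast2]
      apply ih (k+1) _ (idx+1) (by omega) (by simp [hlen]) ?_ (by omega)
      intro w hw
      simp only [List.mem_append, List.mem_singleton]
      rintro (h1 | h1)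
      · exact hpre w (hsub w hw) h1
      · exact hm _ hmmem (h1 ▸ List.mem_of_mem_drop hw)
    · -- last occurrence: both keep the value
      have hdupk : rdDupCount (orig.drop k) = rdDupCount (orig.drop (k+1)) := by
        rw [hdropk]; simp [rdDupCount, hdup]
      have hc0 : (orig.drop (k+1)).count orig[k] = 0 := List.count_eq_zero.mpr hdup
      rw [if_neg (by push_cast; omega), if_pos (by simp [hdup])]
      have hsplit : acc ++ orig.drop k = (acc ++ [orig[k]]) ++ orig.drop (k+1) := by
        rw [hdropk]; simp
      rw [hsplit]
      have hcast1 : ((k : Int) + 1) = ((k + 1 : Nat) : Int) := by push_cast; ring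
      rw [hcast1]
      apply ih (k+1) _ idx (by omega) (by simp [hlen]) ?_ (by omega)
      intro w hw
      simp only [List.mem_append, List.mem_singleton]
      rintro (h1 | h1)
      · exact hpre w (hsub w hw) h1
      · exact hdup (h1 ▸ hw)


-- ===== VERDICT (by name: the statement is the Claim_ definition above) =====
theorem resolve_duplicates_spec : Claim_equal_resolve_duplicates := by
  intro child parent1 parent2 _ hpre
  unfold Spec_resolve_duplicates resolve_duplicates resolve_duplicates_alt
  dsimp only
  rw [List.foldl_reverse]
  obtain ⟨h2, h1⟩ := rd_rev_pass child (fun _ => false) (PySem.Set.ofList []) []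
    (by intro g; simp [PySem.Set.mem_ofList])
  rw [h2]
  simp only [List.nil_append, List.reverse_reverse]
  have hseen : ∀ x, PySem.Set.contains
      (child.foldr (fun g s => rdRevStep s g) ((PySem.Set.ofList [] : PySem.Set Int), ([] : List Bool))).1 x
      = decide (x ∈ child) := by
    intro x
    rw [Bool.eq_iff_iff, PySem.Set.contains_iff, h1 x]
    simp
  have hofl : ∀ x, PySem.Set.contains (PySem.Set.ofList child) x = decide (x ∈ child) := by
    intro x
    rw [Bool.eq_iff_iff, PySem.Set.contains_iff, PySem.Set.mem_ofList]
    simp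
  have hfB : parent1.filter (fun g => !(PySem.Set.contains
        (child.foldr (fun g s => rdRevStep s g) ((PySem.Set.ofList [] : PySem.Set Int), ([] : List Bool))).1 g))
      = parent1.filter (fun g => !(PySem.Set.contains (PySem.Set.ofList child) g)) := by
    apply List.filter_congr
    intro x _
    rw [hseen x, hofl x]
  rw [hfB]
  have hfp : parent1.filter (fun g => !(PySem.Set.contains (PySem.Set.ofList child) g))
      = parent1.filter (fun g => decide (g ∉ child)) := by
    apply List.filter_congr
    intro x _
    rw [hofl x]
    simp
  have hm : ∀ x ∈ parent1.filter (fun g => !(PySem.Set.contains (PySem.Set.ofList child) g)),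
      x ∉ child := by
    intro x hx
    have h := (List.mem_filter.mp hx).2
    rw [hofl x] at h
    simpa using h
  have h := rd_loop_eq child
    (parent1.filter (fun g => !(PySem.Set.contains (PySem.Set.ofList child) g))) hm
    child.length 0 [] 0 (by omega) rfl (by simp)
    (by
      unfold Pre_resolve_duplicates at hpre
      rw [hfp]
      simpa using hpre)
  simpa using h
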